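-- pv_equiv track=rewrite | github.com/janmichael88/Leetcode_Monthly_Challenges | 2025_Challenges/Oct_2025.py | can_do
-- ===== SOURCE A (Python) =====
-- def can_do(nums,k):
--     streaks = [1]
--     n = len(nums)
--     for i in range(1,n):
--         if nums[i-1] < nums[i]:
--             streaks.append(streaks[-1] + 1)
--         else:
--             streaks.append(1)
--
--     #check streaks and steaks[i+1]
--     for i in range(len(streaks)-k):
--         if streaks[i] >= k and streaks[i+k] >= k:
--             return True
--     return False
-- ===== SOURCE B (Python) =====
-- def can_do(nums, k):
--     # One pass over nums tracking only the current strictly-increasing run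
--     # length and the length of the run just before it (O(1) extra space).
--     prev_run = 0
--     cur = 0
--     last = None
--     for x in nums:
--         if last is not None and last < x:
--             cur += 1
--         else:
--             prev_run, cur = cur, 1
--         last = x
--         if cur >= 2 * k or (prev_run >= k and cur >= k):
--             return True
--     return False
-- ===== Notes on version B (the rewrite author's own statement) =====
-- stated objective: simpler
-- what changed: B replaces A's per-index streaks array plus second sliding scan (streaks[i]/streaks[i+k]) by a single pass that keeps only the current run length and the previous run length in O(1) extra space, firing when cur >= 2k or prev >= k and cur >= k.
-- intended difference: On the empty list with k <= 0 A returns True because it seeds streaks=[1] even when nums is empty; B returns False, the intended answer since an empty array contains no increasing streak at all. — e.g. on can_do([], 0): A returns true, B returns false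
import Mathlib
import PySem

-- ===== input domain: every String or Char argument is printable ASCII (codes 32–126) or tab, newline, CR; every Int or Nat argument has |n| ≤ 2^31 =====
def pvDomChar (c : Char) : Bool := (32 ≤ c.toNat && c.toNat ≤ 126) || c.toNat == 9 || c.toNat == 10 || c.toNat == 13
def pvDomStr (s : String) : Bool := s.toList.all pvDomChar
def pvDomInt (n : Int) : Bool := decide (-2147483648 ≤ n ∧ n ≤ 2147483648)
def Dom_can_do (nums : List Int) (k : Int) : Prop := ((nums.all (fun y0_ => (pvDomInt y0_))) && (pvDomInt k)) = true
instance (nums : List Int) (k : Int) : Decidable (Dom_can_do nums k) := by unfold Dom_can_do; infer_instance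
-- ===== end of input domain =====

-- B: one pass keeping only the current and previous run lengths (O(1) extra space) instead of A's streaks array + second scan; B returns the intended False (not A's True) on empty input with k ≤ 0.

-- ===== PORT A =====
def can_do (nums : List Int) (k : Int) : Bool :=
  let streaks : List Int := (PySem.List.pyRange 1 (nums.length : Int) 1).foldl
    (fun st i =>
      if PySem.List.pyGetD nums (i - 1) 0 < PySem.List.pyGetD nums i 0 then
        st ++ [PySem.List.pyGetD st (-1) 0 + 1]
      else
        st ++ [1]) [1]
  -- 'for i in range(...): if …: return True' / 'return False' is the first-hit search = any
  (PySem.List.pyRange 0 ((streaks.length : Int) - k) 1).any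
    (fun i => decide (k ≤ PySem.List.pyGetD streaks i 0) &&
              decide (k ≤ PySem.List.pyGetD streaks (i + k) 0))

-- ===== PORT B =====
def canDoAltGo (k : Int) (xs : List Int) (prevRun cur : Int) (last : Option Int) : Bool :=
  match xs with
  | [] => false
  | x :: rest =>
    let st : Int × Int :=
      match last with
      | some l => if l < x then (prevRun, cur + 1) else (cur, 1)
      | none => (cur, 1)
    if 2 * k ≤ st.2 ∨ (k ≤ st.1 ∧ k ≤ st.2) then true
    else canDoAltGo k rest st.1 st.2 (some x)

def can_do_alt (nums : List Int) (k : Int) : Bool :=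
  canDoAltGo k nums 0 0 none

-- ===== PRECONDITION & SPEC =====
-- Pre_ excludes exactly the inputs on which A raises IndexError: k < -len(streaks)
-- (= -max(len(nums),1)), where streaks[i+k] reaches below index -len.
def Pre_can_do (nums : List Int) (k : Int) : Prop :=
  -(max (nums.length : Int) 1) ≤ k
instance (nums : List Int) (k : Int) : Decidable (Pre_can_do nums k) := by
  unfold Pre_can_do; infer_instance

def pvWitness_can_do : List Int × Int := ([1, 2, 3, 1, 2, 3], 2)

-- On the empty list with k ≤ 0, A returns True (an artefact of seeding streaks = [1] even
-- when nums is empty); B returns False, the intended answer since an empty array contains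
-- no increasing streak at all.
def D_can_do (nums : List Int) (k : Int) : Prop := nums = [] ∧ k ≤ 0
instance (nums : List Int) (k : Int) : Decidable (D_can_do nums k) := by
  unfold D_can_do; infer_instance

def Spec_can_do (nums : List Int) (k : Int) (out : Bool) : Prop :=
  ¬ D_can_do nums k → out = can_do_alt nums k
instance (nums : List Int) (k : Int) (out : Bool) : Decidable (Spec_can_do nums k out) := by
  unfold Spec_can_do; infer_instance

def pvDiffWitness_can_do : List Int × Int := ([], 0)
def pvDiffWitnessOut_can_do : Bool × Bool := (true, false)

-- ===== CLAIM (what is proved, stated in full; the proofs are below) =====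
def Claim_unchanged_can_do : Prop := ∀ (nums : List Int) (k : Int), Dom_can_do nums k → Pre_can_do nums k → Spec_can_do nums k (can_do nums k)
def Claim_changed_can_do : Prop := Dom_can_do (pvDiffWitness_can_do.1) (pvDiffWitness_can_do.2) ∧ Pre_can_do (pvDiffWitness_can_do.1) (pvDiffWitness_can_do.2) ∧ D_can_do (pvDiffWitness_can_do.1) (pvDiffWitness_can_do.2) ∧ can_do (pvDiffWitness_can_do.1) (pvDiffWitness_can_do.2) = pvDiffWitnessOut_can_do.1 ∧ can_do_alt (pvDiffWitness_can_do.1) (pvDiffWitness_can_do.2) = pvDiffWitnessOut_can_do.2 ∧ pvDiffWitnessOut_can_do.1 ≠ pvDiffWitnessOut_can_do.2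
def Claim_exact_can_do : Prop := ∀ (nums : List Int) (k : Int), Dom_can_do nums k → Pre_can_do nums k → D_can_do nums k → can_do nums k ≠ can_do_alt nums k

-- ===== LEMMAS AND PROOFS =====

-- streak value ending at index i (1-based length of the increasing run ending at i)
def sfun (nums : List Int) : ℕ → Int
  | 0 => 1
  | i + 1 => if nums.getD i 0 < nums.getD (i + 1) 0 then sfun nums i + 1 else 1

-- length of the maximal run strictly before the run containing i (0 if none)
def pfun (nums : List Int) : ℕ → Int
  | 0 => 0
  | i + 1 => if nums.getD i 0 < nums.getD (i + 1) 0 then pfun nums i else sfun nums i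

theorem sfun_pos (nums : List Int) (i : ℕ) : 1 ≤ sfun nums i := by
  induction i with
  | zero => simp [sfun]
  | succ i ih => simp only [sfun]; split <;> omega

theorem sfun_le (nums : List Int) (i : ℕ) : sfun nums i ≤ (i : Int) + 1 := by
  induction i with
  | zero => simp [sfun]
  | succ i ih => simp only [sfun]; split <;> push_cast <;> omega

theorem sfun_chain (nums : List Int) (t i : ℕ) (h : (t : Int) < sfun nums i) :
    sfun nums (i - t) = sfun nums i - t := by
  induction t generalizing i with
  | zero => simp
  | succ t ih =>
    match i, h with
    | 0, h => have := sfun_pos nums 0; simp [sfun] at h ⊢; omega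
    | i + 1, h =>
      have h2 : (1 : Int) < sfun nums (i + 1) := by push_cast at h; omega
      have hinc : nums.getD i 0 < nums.getD (i + 1) 0 := by
        by_contra hc
        simp only [sfun, if_neg hc] at h2; omega
      have hs : sfun nums (i + 1) = sfun nums i + 1 := by
        simp only [sfun, if_pos hinc]
      have ht : (t : Int) < sfun nums i := by push_cast at h; omega
      have h3 := ih i ht
      have he : i + 1 - (t + 1) = i - t := Nat.succ_sub_succ i t
      rw [he, h3, hs]; push_cast; ring

theorem pfun_spec (nums : List Int) (i s : ℕ) (hs : sfun nums i = (s : Int)) :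
    (s ≤ i → pfun nums i = sfun nums (i - s)) ∧ (i < s → pfun nums i = 0) := by
  induction i generalizing s with
  | zero =>
    constructor
    · intro h; simp [sfun] at hs; omega
    · intro _; simp [pfun]
  | succ i ih =>
    by_cases hinc : nums.getD i 0 < nums.getD (i + 1) 0
    · have hsucc : sfun nums (i + 1) = sfun nums i + 1 := by simp only [sfun, if_pos hinc]
      have hp : pfun nums (i + 1) = pfun nums i := by simp only [pfun, if_pos hinc]
      have hpos := sfun_pos nums i
      have hs1 : 1 ≤ s := by omega
      have hsi : sfun nums i = ((s - 1 : ℕ) : Int) := by omega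
      obtain ⟨ih1, ih2⟩ := ih (s - 1) hsi
      constructor
      · intro h
        have he : i + 1 - s = i - (s - 1) := by omega
        rw [hp, he]; exact ih1 (by omega)
      · intro h; rw [hp]; exact ih2 (by omega)
    · have hsucc : sfun nums (i + 1) = 1 := by simp only [sfun, if_neg hinc]
      have hs1 : s = 1 := by omega
      constructor
      · intro h
        rw [hs1]
        simp only [pfun, if_neg hinc, Nat.add_sub_cancel]
      · intro h; omega

-- A's streaks list is the table of sfun values
theorem streaks_eq (nums : List Int) (m : ℕ) (h1 : 1 ≤ m) (hm : m ≤ nums.length) :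
    (PySem.List.pyRange 1 (m : Int) 1).foldl
      (fun st i =>
        if PySem.List.pyGetD nums (i - 1) 0 < PySem.List.pyGetD nums i 0 then
          st ++ [PySem.List.pyGetD st (-1) 0 + 1]
        else
          st ++ [1]) [1]
    = (List.range m).map (fun i => sfun nums i) := by
  induction m with
  | zero => omega
  | succ m ih =>
    by_cases hm1 : m = 0
    · subst hm1
      rw [PySem.List.pyRange_one_eq_nil (by norm_num)]
      simp [sfun]
    · have hmm : 1 ≤ m := by omega
      have hrec := ih hmm (by omega)
      have hsplit : PySem.List.pyRange 1 ((m : Int) + 1) 1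
          = PySem.List.pyRange 1 (m : Int) 1 ++ [(m : Int)] := by
        exact PySem.List.pyRange_one_succ_right (by exact_mod_cast hmm)
      have hcast : ((m + 1 : ℕ) : Int) = (m : Int) + 1 := by push_cast; ring
      rw [hcast, hsplit, List.foldl_append, hrec]
      have hlast : PySem.List.pyGetD ((List.range m).map (fun i => sfun nums i)) (-1) 0
          = sfun nums (m - 1) := by
        have : List.range m = List.range (m - 1) ++ [m - 1] := by
          conv_lhs => rw [show m = (m - 1) + 1 by omega, List.range_succ]
        rw [this, List.map_append]
        exact PySem.List.pyGetD_neg_one_append_singleton _ _ _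
      have hidx : (m : Int) - 1 = ((m - 1 : ℕ) : Int) := by push_cast [hmm]; ring
      simp only [List.foldl_cons, List.foldl_nil, hidx, PySem.List.pyGetD_natCast, hlast]
      have hsf : sfun nums m = if nums.getD (m - 1) 0 < nums.getD m 0
          then sfun nums (m - 1) + 1 else 1 := by
        conv_lhs => rw [show m = (m - 1) + 1 by omega]
        simp only [sfun]
        rw [show (m - 1) + 1 = m by omega]
      rw [List.range_succ, List.map_append]
      by_cases hc : nums.getD (m - 1) 0 < nums.getD m 0
      · rw [if_pos hc, List.map_singleton, hsf, if_pos hc]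
      · rw [if_neg hc, List.map_singleton, hsf, if_neg hc]

-- B's loop from position m onward, given the state the loop carries at m
theorem altGo_spec (nums : List Int) (k : Int) (d m : ℕ)
    (hd : nums.length ≤ m + d) (h1 : 1 ≤ m) :
    (canDoAltGo k (nums.drop m) (pfun nums (m - 1)) (sfun nums (m - 1))
        (some (nums.getD (m - 1) 0)) = true)
    ↔ ∃ j, m ≤ j ∧ j < nums.length ∧
        (2 * k ≤ sfun nums j ∨ (k ≤ pfun nums j ∧ k ≤ sfun nums j)) := by
  induction d generalizing m with
  | zero =>
    rw [List.drop_eq_nil_of_le (by omega)]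
    simp only [canDoAltGo]
    constructor
    · intro h; exact absurd h (by simp)
    · rintro ⟨j, hj1, hj2, _⟩; omega
  | succ d ih =>
    by_cases hmn : nums.length ≤ m
    · rw [List.drop_eq_nil_of_le hmn]
      simp only [canDoAltGo]
      constructor
      · intro h; exact absurd h (by simp)
      · rintro ⟨j, hj1, hj2, _⟩; omega
    · have hm : m < nums.length := by omega
      have hdrop : nums.drop m = nums[m] :: nums.drop (m + 1) :=
        (List.getElem_cons_drop hm).symm
      have hget : nums[m] = nums.getD m 0 := by
        rw [List.getD_eq_getElem _ _ hm]
      have hmr : (m - 1) + 1 = m := by omega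
      have hstep : ∀ P : Int × Int → Prop,
          P (pfun nums m, sfun nums m) →
          P (if nums.getD (m - 1) 0 < nums[m] then (pfun nums (m - 1), sfun nums (m - 1) + 1)
             else (sfun nums (m - 1), 1)) := by
        intro P hP
        have hp : pfun nums m = if nums.getD (m - 1) 0 < nums.getD m 0
            then pfun nums (m - 1) else sfun nums (m - 1) := by
          conv_lhs => rw [← hmr]
          simp only [pfun]; rw [hmr]
        have hsfx : sfun nums m = if nums.getD (m - 1) 0 < nums.getD m 0
            then sfun nums (m - 1) + 1 else 1 := by
          conv_lhs => rw [← hmr]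
          simp only [sfun]; rw [hmr]
        rw [hget]
        by_cases hc : nums.getD (m - 1) 0 < nums.getD m 0
        · rw [if_pos hc]; rw [hp, hsfx, if_pos hc, if_pos hc] at hP; exact hP
        · rw [if_neg hc]; rw [hp, hsfx, if_neg hc, if_neg hc] at hP; exact hP
      rw [hdrop]
      simp only [canDoAltGo]
      set C := fun j => (2 * k ≤ sfun nums j ∨ (k ≤ pfun nums j ∧ k ≤ sfun nums j)) with hC
      by_cases hcm : C m
      · have : ∀ st : Int × Int, st = (pfun nums m, sfun nums m) →
            (2 * k ≤ st.2 ∨ (k ≤ st.1 ∧ k ≤ st.2)) := by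
          rintro st rfl; exact hcm
        constructor
        · intro _; exact ⟨m, le_refl m, hm, hcm⟩
        · intro _
          rw [if_pos]
          exact hstep (fun st => 2 * k ≤ st.2 ∨ (k ≤ st.1 ∧ k ≤ st.2)) hcm
      · have hnot : ¬ (2 * k ≤ (if nums.getD (m - 1) 0 < nums[m]
            then (pfun nums (m - 1), sfun nums (m - 1) + 1)
            else (sfun nums (m - 1), 1)).2 ∨
            (k ≤ (if nums.getD (m - 1) 0 < nums[m]
            then (pfun nums (m - 1), sfun nums (m - 1) + 1)
            else (sfun nums (m - 1), 1)).1 ∧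
             k ≤ (if nums.getD (m - 1) 0 < nums[m]
            then (pfun nums (m - 1), sfun nums (m - 1) + 1)
            else (sfun nums (m - 1), 1)).2)) := by
          revert hcm
          exact fun hcm h => hcm (by
            have := hstep (fun st => ((2 * k ≤ st.2 ∨ (k ≤ st.1 ∧ k ≤ st.2)) →
              (2 * k ≤ sfun nums m ∨ (k ≤ pfun nums m ∧ k ≤ sfun nums m)))) (fun h => h)
            exact this h)
        rw [if_neg hnot]
        have hst2 : ∀ st : Int × Int, st = (if nums.getD (m - 1) 0 < nums[m]
            then (pfun nums (m - 1), sfun nums (m - 1) + 1)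
            else (sfun nums (m - 1), 1)) →
            canDoAltGo k (nums.drop (m + 1)) st.1 st.2 (some nums[m])
            = canDoAltGo k (nums.drop (m + 1)) (pfun nums m) (sfun nums m)
              (some (nums.getD m 0)) := by
          rintro st rfl
          have := hstep (fun st => canDoAltGo k (nums.drop (m + 1)) st.1 st.2 (some nums[m])
            = canDoAltGo k (nums.drop (m + 1)) (pfun nums m) (sfun nums m)
              (some (nums.getD m 0))) (by rw [hget])
          exact this
        rw [hst2 _ rfl]
        have hrec := ih (m + 1) (by omega) (by omega)
        rw [show (m + 1) - 1 = m by omega] at hrec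
        rw [hrec]
        constructor
        · rintro ⟨j, hj1, hj2, hj3⟩; exact ⟨j, by omega, hj2, hj3⟩
        · rintro ⟨j, hj1, hj2, hj3⟩
          rcases Nat.eq_or_lt_of_le hj1 with h | h
          · exact absurd hj3 (h ▸ hcm)
          · exact ⟨j, h, hj2, hj3⟩

theorem alt_iff (nums : List Int) (k : Int) :
    can_do_alt nums k = true ↔ ∃ j, j < nums.length ∧
      (2 * k ≤ sfun nums j ∨ (k ≤ pfun nums j ∧ k ≤ sfun nums j)) := by
  match nums with
  | [] =>
    simp only [can_do_alt, canDoAltGo]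
    constructor
    · intro h; exact absurd h (by simp)
    · rintro ⟨j, hj, _⟩; simp at hj
  | x :: rest =>
    show canDoAltGo k (x :: rest) 0 0 none = true ↔ _
    simp only [canDoAltGo]
    have h0 : (x :: rest).drop 1 = rest := rfl
    have hg0 : (x :: rest).getD 0 0 = x := rfl
    have hspec := altGo_spec (x :: rest) k (x :: rest).length 1 (by omega) (by omega)
    rw [show (1 : ℕ) - 1 = 0 by omega, h0, hg0] at hspec
    have hp0 : pfun (x :: rest) 0 = 0 := rfl
    have hs0 : sfun (x :: rest) 0 = 1 := rfl
    by_cases hc0 : 2 * k ≤ sfun (x :: rest) 0 ∨ (k ≤ pfun (x :: rest) 0 ∧ k ≤ sfun (x :: rest) 0)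
    · rw [if_pos (by rw [hp0, hs0] at hc0; exact hc0)]
      constructor
      · intro _; exact ⟨0, by simp, hc0⟩
      · intro _; rfl
    · rw [if_neg (by rw [hp0, hs0] at hc0; exact hc0)]
      rw [hp0, hs0] at hspec
      rw [hspec]
      constructor
      · rintro ⟨j, hj1, hj2, hj3⟩; exact ⟨j, hj2, hj3⟩
      · rintro ⟨j, hj2, hj3⟩
        match j with
        | 0 => exact absurd hj3 hc0
        | j + 1 => exact ⟨j + 1, by omega, hj2, hj3⟩

theorem a_iff (nums : List Int) (k : Int) (hn : 1 ≤ nums.length) (hk : 1 ≤ k) :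
    can_do nums k = true ↔ ∃ a : ℕ, (a : Int) + k < nums.length ∧
      k ≤ sfun nums a ∧ k ≤ sfun nums (a + k.toNat) := by
  have hsteq := streaks_eq nums nums.length hn (le_refl _)
  simp only [can_do]
  rw [hsteq, List.any_eq_true]
  have hlen : ((List.range nums.length).map (fun i => sfun nums i)).length = nums.length := by
    simp
  rw [hlen]
  constructor
  · rintro ⟨i, hmem, hP⟩
    rw [PySem.List.mem_pyRange_one] at hmem
    obtain ⟨hi0, hik⟩ := hmem
    simp only [Bool.and_eq_true, decide_eq_true_eq] at hP
    obtain ⟨hP1, hP2⟩ := hP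
    have hb1 : i < (((List.range nums.length).map (fun i => sfun nums i)).length : Int) := by
      rw [hlen]; omega
    have hb2 : i + k < (((List.range nums.length).map (fun i => sfun nums i)).length : Int) := by
      rw [hlen]; omega
    rw [PySem.List.pyGetD_eq_getElem _ _ hi0 hb1] at hP1
    rw [PySem.List.pyGetD_eq_getElem _ _ (by omega) hb2] at hP2
    simp only [List.getElem_map, List.getElem_range] at hP1 hP2
    refine ⟨i.toNat, by omega, hP1, ?_⟩
    have hik2 : (i + k).toNat = i.toNat + k.toNat := by omega
    rw [hik2] at hP2
    exact hP2
  · rintro ⟨a, ha, h1, h2⟩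
    refine ⟨(a : Int), ?_, ?_⟩
    · rw [PySem.List.mem_pyRange_one]
      constructor
      · positivity
      · omega
    · simp only [Bool.and_eq_true, decide_eq_true_eq]
      have hb1 : (a : Int) < (((List.range nums.length).map (fun i => sfun nums i)).length : Int) := by
        rw [hlen]; omega
      have hb2 : (a : Int) + k < (((List.range nums.length).map (fun i => sfun nums i)).length : Int) := by
        rw [hlen]; omega
      constructor
      · rw [PySem.List.pyGetD_eq_getElem _ _ (by positivity) hb1]
        simpa using h1
      · rw [PySem.List.pyGetD_eq_getElem _ _ (by omega) hb2]
        have hik2 : ((a : Int) + k).toNat = a + k.toNat := by omega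
        simp only [List.getElem_map, List.getElem_range, hik2]
        exact h2

theorem main_iff (nums : List Int) (k : Int) (hk : 1 ≤ k) :
    (∃ a : ℕ, (a : Int) + k < nums.length ∧
        k ≤ sfun nums a ∧ k ≤ sfun nums (a + k.toNat))
    ↔ ∃ j, j < nums.length ∧
        (2 * k ≤ sfun nums j ∨ (k ≤ pfun nums j ∧ k ≤ sfun nums j)) := by
  have hkK : ((k.toNat : ℕ) : Int) = k := Int.toNat_of_nonneg (by omega)
  constructor
  · rintro ⟨a, hlenb, ha, hak⟩
    set K := k.toNat with hK
    set j := a + K with hj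
    have hjn : j < nums.length := by omega
    by_cases h2k : 2 * k ≤ sfun nums j
    · exact ⟨j, hjn, Or.inl h2k⟩
    · have hLk : sfun nums j = k := by
        rcases lt_or_eq_of_le hak with hlt | heq
        · exfalso
          have hchain := sfun_chain nums K j (by rw [hkK]; exact hlt)
          have hja : j - K = a := by omega
          rw [hja, hkK] at hchain
          omega
        · omega
      have hsK : sfun nums j = (K : Int) := by rw [hkK]; exact hLk
      obtain ⟨hp1, _⟩ := pfun_spec nums j K hsK
      have hpf := hp1 (by omega)
      have hja : j - K = a := by omega
      rw [hja] at hpf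
      exact ⟨j, hjn, Or.inr ⟨by rw [hpf]; exact ha, by rw [hLk]⟩⟩
  · rintro ⟨j, hjn, hC⟩
    set K := k.toNat with hK
    rcases hC with h2k | ⟨hpv, hsv⟩
    · have hle := sfun_le nums j
      have hjK : K ≤ j := by omega
      have hchain := sfun_chain nums K j (by rw [hkK]; omega)
      refine ⟨j - K, by omega, ?_, ?_⟩
      · rw [hchain, hkK]; omega
      · rw [show j - K + K = j by omega]; omega
    · have hsp := sfun_pos nums j
      set S := (sfun nums j).toNat with hS
      have hSk : sfun nums j = (S : Int) := (Int.toNat_of_nonneg (by omega)).symm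
      obtain ⟨hp1, hp2⟩ := pfun_spec nums j S hSk
      have hSj : S ≤ j := by
        by_contra hcon
        have := hp2 (by omega)
        omega
      have hpfv := hp1 hSj
      have hKS : K ≤ S := by omega
      refine ⟨j - S, by omega, ?_, ?_⟩
      · rw [← hpfv]; exact hpv
      · have hchain := sfun_chain nums (S - K) j (by rw [hSk]; omega)
        rw [show j - S + K = j - (S - K) by omega, hchain, hSk]
        omega

-- ===== VERDICT (by name: the statement is the Claim_ definition above) =====
theorem can_do_spec : Claim_unchanged_can_do := by
  intro nums k hdom hpre hnd
  match nums with
  | [] =>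
    have hk1 : 1 ≤ k := by
      by_contra h
      exact hnd ⟨rfl, by omega⟩
    have ha : can_do [] k = false := by
      simp only [can_do, List.length_nil, Nat.cast_zero]
      rw [PySem.List.pyRange_one_eq_nil (show (0 : Int) ≤ 1 by norm_num)]
      simp only [List.foldl_nil, List.length_cons, List.length_nil]
      push_cast
      rw [PySem.List.pyRange_one_eq_nil (by omega : (1 : Int) - k ≤ 0)]
      simp
    rw [ha]
    simp [can_do_alt, canDoAltGo]
  | x :: rest =>
    by_cases hk : 1 ≤ k
    · have h1 := a_iff (x :: rest) k (by simp) hk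
      have h2 := alt_iff (x :: rest) k
      have h3 := main_iff (x :: rest) k hk
      rw [Bool.eq_iff_iff, h1, h2]
      exact h3
    · have hk0 : k ≤ 0 := by omega
      have hn1 : 1 ≤ (x :: rest).length := by simp
      have hnk : -((x :: rest).length : Int) ≤ k := by
        simp only [Pre_can_do] at hpre
        omega
      have ha : can_do (x :: rest) k = true := by
        have hsteq := streaks_eq (x :: rest) (x :: rest).length hn1 (le_refl _)
        simp only [can_do]
        rw [hsteq, List.any_eq_true]
        have hlen : ((List.range (x :: rest).length).map
            (fun i => sfun (x :: rest) i)).length = (x :: rest).length := by simp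
        refine ⟨0, ?_, ?_⟩
        · rw [PySem.List.mem_pyRange_one]
          refine ⟨le_refl 0, ?_⟩
          rw [hlen]
          omega
        · simp only [Bool.and_eq_true, decide_eq_true_eq]
          have hb0 : (0 : Int) < (((List.range (x :: rest).length).map
              (fun i => sfun (x :: rest) i)).length : Int) := by rw [hlen]; omega
          constructor
          · rw [PySem.List.pyGetD_eq_getElem _ _ (le_refl 0) hb0]
            simp only [Int.toNat_zero, List.getElem_map, List.getElem_range]
            have := sfun_pos (x :: rest) 0
            omega
          · have hmem := PySem.List.pyGetD_mem ((List.range (x :: rest).length).map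
              (fun i => sfun (x :: rest) i)) (i := 0 + k) (0 : Int) (by
                constructor
                · rw [hlen]; omega
                · rw [hlen]; omega)
            rw [List.mem_map] at hmem
            obtain ⟨a, _, hval⟩ := hmem
            have := sfun_pos (x :: rest) a
            omega
      have hb : can_do_alt (x :: rest) k = true := by
        simp only [can_do_alt, canDoAltGo]
        rw [if_pos (Or.inl (by omega))]
      rw [ha, hb]

theorem can_do_changed : Claim_changed_can_do := by
  unfold Claim_changed_can_do; decide

theorem can_do_tight : Claim_exact_can_do := by
  intro nums k hdom hpre hD
  obtain ⟨rfl, hk0⟩ := hD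
  have h1 : -1 ≤ k := by
    simp only [Pre_can_do, List.length_nil, Nat.cast_zero] at hpre
    omega
  interval_cases k <;> decide
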